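-- pv_equiv track=rewrite | github.com/hiteshpindikanti/Coding_Questions | DCP/DCP121.py | can_be_palindrome
-- ===== SOURCE A (Python) =====
-- def can_be_palindrome(string: str, i: int, j: int, k: int) -> bool:
--     if i >= j:
--         return True
--     elif string[i] == string[j]:
--         return can_be_palindrome(string, i + 1, j - 1, k)
--     elif k > 0:
--         return can_be_palindrome(string, i + 1, j, k - 1) or can_be_palindrome(string, i, j - 1, k - 1)
--     else:
--         return False
-- ===== SOURCE B (Python) =====
-- def can_be_palindrome(string: str, i: int, j: int, k: int) -> bool:
--     if i >= j:
--         return True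
--     t = [string[x] for x in range(i, j + 1)]
--     n = len(t)
--     # dp[(a, b)] = minimum deletions to make t[a..b] a palindrome; absent cells (b - a < 1) are 0
--     dp = {}
--     for length in range(2, n + 1):
--         for a in range(0, n - length + 1):
--             b = a + length - 1
--             if t[a] == t[b]:
--                 dp[(a, b)] = dp.get((a + 1, b - 1), 0)
--             else:
--                 dp[(a, b)] = 1 + min(dp.get((a + 1, b), 0), dp.get((a, b - 1), 0))
--     d = dp[(0, n - 1)]
--     return d == 0 or d <= k
-- ===== Notes on version B (the rewrite author's own statement) =====
-- stated objective: alternative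
-- what changed: A's exponential branching recursion over (i, j, k) is replaced by a bottom-up interval DP that computes the minimum number of deletions needed to make the segment a palindrome and compares it with k; B trades A's fast easy-case short-circuiting for worst-case polynomial behaviour.
import Mathlib
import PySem

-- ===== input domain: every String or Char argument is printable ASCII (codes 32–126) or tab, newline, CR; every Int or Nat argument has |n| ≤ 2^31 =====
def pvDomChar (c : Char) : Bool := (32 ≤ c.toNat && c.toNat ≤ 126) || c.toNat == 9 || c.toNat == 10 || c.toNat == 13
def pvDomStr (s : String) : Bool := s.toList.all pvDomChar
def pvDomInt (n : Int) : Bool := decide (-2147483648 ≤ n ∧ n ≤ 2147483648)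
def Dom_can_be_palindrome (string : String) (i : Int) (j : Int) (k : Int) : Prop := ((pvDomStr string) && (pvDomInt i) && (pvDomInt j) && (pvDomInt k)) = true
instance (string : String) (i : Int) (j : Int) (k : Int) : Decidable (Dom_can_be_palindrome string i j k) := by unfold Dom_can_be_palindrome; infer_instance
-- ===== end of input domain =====

-- B replaces A's branching recursion by a bottom-up interval DP (minimum deletions to
-- make the segment a palindrome, compared with k); objective: alternative algorithm.

-- ===== PORT A =====
def can_be_palindrome (string : String) (i : Int) (j : Int) (k : Int) : Bool :=
  if i ≥ j then true
  else
    match PySem.Str.pyGet? string i, PySem.Str.pyGet? string j with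
    | some a, some b =>
        if a = b then can_be_palindrome string (i + 1) (j - 1) k
        else if k > 0 then
          can_be_palindrome string (i + 1) j (k - 1) || can_be_palindrome string i (j - 1) (k - 1)
        else false
    | _, _ => false        -- string[i] / string[j] raises IndexError: excluded by Pre_
termination_by (j - i).toNat
decreasing_by all_goals omega

-- ===== PORT B =====
def can_be_palindrome_alt (string : String) (i : Int) (j : Int) (k : Int) : Bool :=
  if i ≥ j then true
  else
    let t : List Char := (PySem.List.pyRange i (j + 1) 1).filterMap
      (fun x => PySem.Str.pyGet? string x)      -- [string[x] for x in range(i, j+1)]; none = IndexError, excluded by Pre_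
    let n : Int := t.length
    let dp : PySem.Dict (Int × Int) Int :=
      (PySem.List.pyRange 2 (n + 1) 1).foldl (fun dp length =>
        (PySem.List.pyRange 0 (n - length + 1) 1).foldl (fun dp a =>
          let b := a + length - 1
          if PySem.List.pyGet? t a = PySem.List.pyGet? t b then
            dp.insert (a, b) (dp.getD (a + 1, b - 1) 0)
          else
            dp.insert (a, b) (1 + min (dp.getD (a + 1, b) 0) (dp.getD (a, b - 1) 0))) dp)
        PySem.Dict.empty
    let d : Int := dp.getD (0, n - 1) 0
    d == 0 || decide (d ≤ k)

-- ===== PRECONDITION & SPEC =====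
-- Pre_ excludes exactly the inputs where Python raises IndexError (i < j with i or j out of range,
-- under Python's negative-index rule); both A and B raise there.
def Pre_can_be_palindrome (string : String) (i : Int) (j : Int) (k : Int) : Prop :=
  i < j → (-(string.toList.length : Int) ≤ i ∧ j < (string.toList.length : Int))
instance (string : String) (i : Int) (j : Int) (k : Int) : Decidable (Pre_can_be_palindrome string i j k) := by unfold Pre_can_be_palindrome; infer_instance
def pvWitness_can_be_palindrome : String × Int × Int × Int := ("abcba", 0, 4, 1)

def Spec_can_be_palindrome (string : String) (i : Int) (j : Int) (k : Int) (out : Bool) : Prop := out = can_be_palindrome_alt string i j k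
instance (string : String) (i : Int) (j : Int) (k : Int) (out : Bool) : Decidable (Spec_can_be_palindrome string i j k out) := by unfold Spec_can_be_palindrome; infer_instance

-- ===== CLAIM (what is proved, stated in full; the proofs are below) =====
def Claim_equal_can_be_palindrome : Prop := ∀ (string : String) (i : Int) (j : Int) (k : Int), Dom_can_be_palindrome string i j k → Pre_can_be_palindrome string i j k → Spec_can_be_palindrome string i j k (can_be_palindrome string i j k)

-- ===== LEMMAS AND PROOFS =====

-- minimum number of deletions to make s[a..b] (Python indexing) a palindrome, as A's recursion computes it
def pvMinDel (s : List Char) (a : Int) (b : Int) : Int :=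
  if a ≥ b then 0
  else
    match PySem.List.pyGet? s a, PySem.List.pyGet? s b with
    | some x, some y =>
        if x = y then pvMinDel s (a + 1) (b - 1)
        else 1 + min (pvMinDel s (a + 1) b) (pvMinDel s a (b - 1))
    | _, _ => 0
termination_by (b - a).toNat
decreasing_by all_goals omega

lemma pvMinDel_nonneg (s : List Char) (a b : Int) : 0 ≤ pvMinDel s a b := by
  fun_induction pvMinDel s a b <;> simp_all <;> omega

lemma pvMinDel_eq_of_eq (s : List Char) (a b : Int) (h : a < b) (c : Char)
    (ha : PySem.List.pyGet? s a = some c) (hb : PySem.List.pyGet? s b = some c) :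
    pvMinDel s a b = pvMinDel s (a + 1) (b - 1) := by
  rw [pvMinDel, if_neg (by omega)]
  simp [ha, hb]

lemma pvMinDel_eq_of_ne (s : List Char) (a b : Int) (h : a < b) (x y : Char) (hxy : x ≠ y)
    (ha : PySem.List.pyGet? s a = some x) (hb : PySem.List.pyGet? s b = some y) :
    pvMinDel s a b = 1 + min (pvMinDel s (a + 1) b) (pvMinDel s a (b - 1)) := by
  rw [pvMinDel, if_neg (by omega)]
  simp [ha, hb, hxy]

lemma canA_eq (string : String) (a b k : Int) :
    (a < b → -(string.toList.length : Int) ≤ a ∧ b < (string.toList.length : Int)) →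
    can_be_palindrome string a b k = decide (pvMinDel string.toList a b ≤ max k 0) := by
  fun_induction can_be_palindrome string a b k with
  | case1 i j k h => intro _; rw [pvMinDel]; simp [show i ≥ j from h]
  | case2 i j k h c hj hi ih =>
      intro H
      obtain ⟨hl, hr⟩ := H (by omega)
      simp only [pysem] at hi hj
      rw [pvMinDel_eq_of_eq string.toList i j (by omega) c hi hj]
      exact ih (fun _ => ⟨by omega, by omega⟩)
  | case3 i j k h ci cj hj hi hne hk ih1 ih2 =>
      intro H
      obtain ⟨hl, hr⟩ := H (by omega)
      simp only [pysem] at hi hj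
      rw [pvMinDel_eq_of_ne string.toList i j (by omega) ci cj hne hi hj]
      rw [ih1 (fun _ => ⟨by omega, hr⟩), ih2 (fun _ => ⟨hl, by omega⟩), ← Bool.decide_or,
        decide_eq_decide]
      have n1 := pvMinDel_nonneg string.toList (i + 1) j
      have n2 := pvMinDel_nonneg string.toList i (j - 1)
      omega
  | case4 i j k h ci cj hj hi hne hk =>
      intro H
      simp only [pysem] at hi hj
      rw [pvMinDel_eq_of_ne string.toList i j (by omega) ci cj hne hi hj]
      symm
      rw [decide_eq_false_iff_not]
      have n1 := pvMinDel_nonneg string.toList (i + 1) j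
      have n2 := pvMinDel_nonneg string.toList i (j - 1)
      omega
  | case5 i j k h hnone =>
      intro H
      obtain ⟨hl, hr⟩ := H (by omega)
      exfalso
      cases hi : PySem.Str.pyGet? string i with
      | none =>
          simp only [pysem, PySem.List.pyGet?_eq_none_iff, PySem.Raise.InRange] at hi
          omega
      | some x =>
          cases hj : PySem.Str.pyGet? string j with
          | none =>
              simp only [pysem, PySem.List.pyGet?_eq_none_iff, PySem.Raise.InRange] at hj
              omega
          | some y => exact hnone x y hi hj

-- the character of s at Python index x (total form, used only under in-range hypotheses)
def pvAt (s : List Char) (x : Int) : Char := (PySem.List.pyGet? s x).getD 'a'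

lemma pvAt_get (s : List Char) (x : Int) (hl : -(s.length : Int) ≤ x) (hr : x < (s.length : Int)) :
    PySem.List.pyGet? s x = some (pvAt s x) := by
  cases h : PySem.List.pyGet? s x with
  | none =>
      rw [PySem.List.pyGet?_eq_none_iff, PySem.Raise.InRange] at h
      omega
  | some c => simp [pvAt, h]

lemma t_eq_map (string : String) (i j : Int)
    (hl : -(string.toList.length : Int) ≤ i) (hr : j < (string.toList.length : Int)) :
    (PySem.List.pyRange i (j + 1) 1).filterMap (fun x => PySem.Str.pyGet? string x)
      = (PySem.List.pyRange i (j + 1) 1).map (fun x => pvAt string.toList x) := by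
  apply List.filterMap_eq_map_iff_forall_eq_some.mpr
  intro x hx
  rw [PySem.List.mem_pyRange_one] at hx
  simp only [pysem]
  exact pvAt_get string.toList x (by omega) (by omega)

lemma t_len (string : String) (i j : Int) (hij : i ≤ j) :
    (((PySem.List.pyRange i (j + 1) 1).map (fun y => pvAt string.toList y)).length : Int)
      = j - i + 1 := by
  simp [PySem.List.length_pyRange_one]
  omega

lemma t_get (string : String) (i j : Int)
    (hl : -(string.toList.length : Int) ≤ i) (hr : j < (string.toList.length : Int))
    (x : Int) (hx1 : i ≤ x) (hx2 : x ≤ j) :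
    PySem.List.pyGet? ((PySem.List.pyRange i (j + 1) 1).map (fun y => pvAt string.toList y)) (x - i)
      = PySem.List.pyGet? string.toList x := by
  have hlen := t_len string i j (by omega)
  rw [PySem.List.pyGet?_eq_some_getElem ((PySem.List.pyRange i (j + 1) 1).map (fun y => pvAt string.toList y)) (by omega) (by omega)]
  rw [List.getElem_map, PySem.List.getElem_pyRange_one]
  rw [pvAt_get string.toList x (by omega) (by omega)]
  congr 2
  omega

lemma pvMinDel_shift (string : String) (i j : Int)
    (hl : -(string.toList.length : Int) ≤ i) (hr : j < (string.toList.length : Int)) :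
    ∀ (a b : Int), 0 ≤ a → b ≤ j - i →
    pvMinDel ((PySem.List.pyRange i (j + 1) 1).map (fun y => pvAt string.toList y)) a b
      = pvMinDel string.toList (i + a) (i + b) := by
  intro a b
  fun_induction pvMinDel ((PySem.List.pyRange i (j + 1) 1).map (fun y => pvAt string.toList y)) a b with
  | case1 a b h =>
      intro _ _
      rw [pvMinDel, if_pos (by omega)]
  | case2 a b h c hb ha ih =>
      intro h0 hb'
      have ga := t_get string i j hl hr (i + a) (by omega) (by omega)
      have gb := t_get string i j hl hr (i + b) (by omega) (by omega)
      rw [show i + a - i = a from by ring] at ga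
      rw [show i + b - i = b from by ring] at gb
      rw [ha] at ga; rw [hb] at gb
      rw [pvMinDel_eq_of_eq string.toList (i + a) (i + b) (by omega) c ga.symm gb.symm]
      rw [ih (by omega) (by omega)]
      rw [show i + (a + 1) = i + a + 1 from by ring, show i + (b - 1) = i + b - 1 from by ring]
  | case3 a b h x y hb ha hne ih1 ih2 =>
      intro h0 hb'
      have ga := t_get string i j hl hr (i + a) (by omega) (by omega)
      have gb := t_get string i j hl hr (i + b) (by omega) (by omega)
      rw [show i + a - i = a from by ring] at ga
      rw [show i + b - i = b from by ring] at gb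
      rw [ha] at ga; rw [hb] at gb
      rw [pvMinDel_eq_of_ne string.toList (i + a) (i + b) (by omega) x y hne ga.symm gb.symm]
      rw [ih1 (by omega) (by omega), ih2 (by omega) (by omega)]
      rw [show i + (a + 1) = i + a + 1 from by ring, show i + (b - 1) = i + b - 1 from by ring]
  | case4 a b h hnone =>
      intro h0 hb'
      exfalso
      have ga := t_get string i j hl hr (i + a) (by omega) (by omega)
      have gb := t_get string i j hl hr (i + b) (by omega) (by omega)
      rw [show i + a - i = a from by ring] at ga
      rw [show i + b - i = b from by ring] at gb
      rw [pvAt_get string.toList (i + a) (by omega) (by omega)] at ga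
      rw [pvAt_get string.toList (i + b) (by omega) (by omega)] at gb
      exact hnone _ _ ga gb

-- invariant of the inner loop (all intervals of length < L correct, plus those of length L starting below m)
lemma dp_inner (t : List Char) (L : Int) (hL : 2 ≤ L) (hLn : L ≤ (t.length : Int)) :
    ∀ (fuel : Nat) (m : Int) (dp : PySem.Dict (Int × Int) Int),
    (((t.length : Int) - L + 1 - m)).toNat ≤ fuel → 0 ≤ m →
    (∀ a b : Int, dp.getD (a, b) 0 =
      if 0 ≤ a ∧ b < (t.length : Int) ∧ a < b ∧ (b - a + 1 ≤ L - 1 ∨ (b - a + 1 = L ∧ a < m))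
      then pvMinDel t a b else 0) →
    ∀ a b : Int,
    ((PySem.List.pyRange m ((t.length : Int) - L + 1) 1).foldl (fun dp a =>
        let b := a + L - 1
        if PySem.List.pyGet? t a = PySem.List.pyGet? t b then
          dp.insert (a, b) (dp.getD (a + 1, b - 1) 0)
        else
          dp.insert (a, b) (1 + min (dp.getD (a + 1, b) 0) (dp.getD (a, b - 1) 0))) dp).getD (a, b) 0
      = if 0 ≤ a ∧ b < (t.length : Int) ∧ a < b ∧
          (b - a + 1 ≤ L - 1 ∨ (b - a + 1 = L ∧ a < (t.length : Int) - L + 1))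
        then pvMinDel t a b else 0 := by
  intro fuel
  induction fuel with
  | zero =>
      intro m dp hfuel h0 hdp a b
      rw [PySem.List.pyRange_one_eq_nil (by omega), List.foldl_nil, hdp]
      exact if_congr (by omega) rfl rfl
  | succ fuel ih =>
      intro m dp hfuel h0 hdp a b
      by_cases hm : m < (t.length : Int) - L + 1
      · rw [PySem.List.pyRange_one_cons hm, List.foldl_cons]
        have gm : PySem.List.pyGet? t m = some (pvAt t m) :=
          pvAt_get t m (by omega) (by omega)
        have gb0 : PySem.List.pyGet? t (m + L - 1) = some (pvAt t (m + L - 1)) :=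
          pvAt_get t (m + L - 1) (by omega) (by omega)
        have hdp' : ∀ a b : Int,
            ((if PySem.List.pyGet? t m = PySem.List.pyGet? t (m + L - 1) then
                dp.insert (m, m + L - 1) (dp.getD (m + 1, m + L - 1 - 1) 0)
              else
                dp.insert (m, m + L - 1)
                  (1 + min (dp.getD (m + 1, m + L - 1) 0) (dp.getD (m, m + L - 1 - 1) 0))).getD (a, b) 0) =
            if 0 ≤ a ∧ b < (t.length : Int) ∧ a < b ∧
                (b - a + 1 ≤ L - 1 ∨ (b - a + 1 = L ∧ a < m + 1))
            then pvMinDel t a b else 0 := by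
          intro a b
          have hval : (if PySem.List.pyGet? t m = PySem.List.pyGet? t (m + L - 1) then
                dp.insert (m, m + L - 1) (dp.getD (m + 1, m + L - 1 - 1) 0)
              else
                dp.insert (m, m + L - 1)
                  (1 + min (dp.getD (m + 1, m + L - 1) 0) (dp.getD (m, m + L - 1 - 1) 0))).getD (a, b) 0
              = if (a, b) = (m, m + L - 1) then pvMinDel t m (m + L - 1) else dp.getD (a, b) 0 := by
            by_cases hc : PySem.List.pyGet? t m = PySem.List.pyGet? t (m + L - 1)
            · rw [if_pos hc, PySem.Dict.getD_insert]
              have hcc : pvAt t m = pvAt t (m + L - 1) := by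
                rw [gm, gb0] at hc
                exact Option.some.inj hc
              have hsub : dp.getD (m + 1, m + L - 1 - 1) 0 = pvMinDel t (m + 1) (m + L - 1 - 1) := by
                rw [hdp]
                by_cases hin : m + 1 < m + L - 1 - 1
                · rw [if_pos ⟨by omega, by omega, hin, by omega⟩]
                · rw [if_neg (by omega), pvMinDel, if_pos (by omega)]
              rw [hsub, pvMinDel_eq_of_eq t m (m + L - 1) (by omega) (pvAt t m) gm (by rw [gb0, hcc])]
            · rw [if_neg hc, PySem.Dict.getD_insert]
              have hcc : pvAt t m ≠ pvAt t (m + L - 1) := by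
                rw [gm, gb0] at hc
                intro heq
                exact hc (by rw [heq])
              have hsub1 : dp.getD (m + 1, m + L - 1) 0 = pvMinDel t (m + 1) (m + L - 1) := by
                rw [hdp]
                by_cases hin : m + 1 < m + L - 1
                · rw [if_pos ⟨by omega, by omega, hin, by omega⟩]
                · rw [if_neg (by omega), pvMinDel, if_pos (by omega)]
              have hsub2 : dp.getD (m, m + L - 1 - 1) 0 = pvMinDel t m (m + L - 1 - 1) := by
                rw [hdp]
                by_cases hin : m < m + L - 1 - 1
                · rw [if_pos ⟨by omega, by omega, hin, by omega⟩]
                · rw [if_neg (by omega), pvMinDel, if_pos (by omega)]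
              rw [hsub1, hsub2,
                pvMinDel_eq_of_ne t m (m + L - 1) (by omega) (pvAt t m) (pvAt t (m + L - 1)) hcc gm gb0]
          rw [hval]
          by_cases hk : (a, b) = (m, m + L - 1)
          · have hk1 : a = m ∧ b = m + L - 1 := by
              simpa [Prod.ext_iff] using hk
            rw [if_pos hk, if_pos (by omega)]
            rw [hk1.1, hk1.2]
          · have hk1 : ¬(a = m ∧ b = m + L - 1) := by
              simpa [Prod.ext_iff] using hk
            rw [if_neg hk, hdp]
            exact if_congr (by omega) rfl rfl
        exact ih (m + 1) _ (by omega) (by omega) hdp' a b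
      · rw [PySem.List.pyRange_one_eq_nil (by omega), List.foldl_nil, hdp]
        exact if_congr (by omega) rfl rfl

-- after processing all lengths up to ℓ, every interval of length ≤ ℓ is correct
lemma dp_outer (t : List Char) :
    ∀ (ℓ : Nat), 1 ≤ ℓ → (ℓ : Int) ≤ (t.length : Int) →
    ∀ a b : Int,
    ((PySem.List.pyRange 2 ((ℓ : Int) + 1) 1).foldl (fun dp length =>
        (PySem.List.pyRange 0 ((t.length : Int) - length + 1) 1).foldl (fun dp a =>
          let b := a + length - 1
          if PySem.List.pyGet? t a = PySem.List.pyGet? t b then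
            dp.insert (a, b) (dp.getD (a + 1, b - 1) 0)
          else
            dp.insert (a, b) (1 + min (dp.getD (a + 1, b) 0) (dp.getD (a, b - 1) 0))) dp)
      PySem.Dict.empty).getD (a, b) 0
      = if 0 ≤ a ∧ b < (t.length : Int) ∧ a < b ∧ b - a + 1 ≤ (ℓ : Int)
        then pvMinDel t a b else 0 := by
  intro ℓ
  induction ℓ with
  | zero => intro h1; omega
  | succ p ihp =>
      intro _ hn a b
      by_cases hp : 1 ≤ p
      · have hc1 : (((p : Nat) + 1 : Nat) : Int) + 1 = ((p : Int) + 1) + 1 := by push_cast; ring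
        rw [hc1, PySem.List.pyRange_one_succ_right (by omega), List.foldl_append, List.foldl_cons,
          List.foldl_nil]
        have hn' : ((p : Int) + 1) ≤ (t.length : Int) := by push_cast at hn; omega
        rw [dp_inner t ((p : Int) + 1) (by omega) hn'
          ((t.length : Int) - ((p : Int) + 1) + 1 - 0).toNat 0 _ (le_refl _) (by omega)
          (fun a b => by
            rw [ihp hp (by omega)]
            exact if_congr (by omega) rfl rfl) a b]
        exact if_congr (by push_cast; omega) rfl rfl
      · have hp0 : p = 0 := by omega
        subst hp0
        rw [show (((0 : Nat) + 1 : Nat) : Int) + 1 = 2 from by norm_num]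
        rw [PySem.List.pyRange_one_eq_nil (by omega), List.foldl_nil, PySem.Dict.getD_empty]
        rw [if_neg (by push_cast; omega)]

theorem can_be_palindrome_spec : Claim_equal_can_be_palindrome := by
  unfold Claim_equal_can_be_palindrome
  intro string i j k hdom hpre
  unfold Spec_can_be_palindrome
  by_cases hij : i ≥ j
  · rw [can_be_palindrome, if_pos hij]
    rw [can_be_palindrome_alt, if_pos hij]
  · obtain ⟨hl, hr⟩ := hpre (by omega)
    rw [canA_eq string i j k hpre]
    simp only [can_be_palindrome_alt]
    rw [if_neg hij]
    rw [t_eq_map string i j hl hr]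
    have hn := t_len string i j (by omega)
    rw [dp_outer ((PySem.List.pyRange i (j + 1) 1).map (fun x => pvAt string.toList x))
      ((PySem.List.pyRange i (j + 1) 1).map (fun x => pvAt string.toList x)).length
      (by omega) (le_refl _)]
    rw [if_pos ⟨by omega, by omega, by omega, by omega⟩]
    rw [pvMinDel_shift string i j hl hr 0
      ((((PySem.List.pyRange i (j + 1) 1).map (fun x => pvAt string.toList x)).length : Int) - 1)
      (by omega) (by omega)]
    rw [show i + (0 : Int) = i from by ring]
    rw [show i + ((((PySem.List.pyRange i (j + 1) 1).map (fun x => pvAt string.toList x)).length : Int) - 1) = j from by omega]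
    have hD := pvMinDel_nonneg string.toList i j
    rw [Bool.eq_iff_iff]
    simp only [decide_eq_true_eq, Bool.or_eq_true, beq_iff_eq]
    omega
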